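-- pv_equiv track=rewrite | github.com/compiler-explorer/ce-library-wizard | core/go_handler.py | _pick_best_subpackage
-- ===== SOURCE A (Python) =====
-- def _pick_best_subpackage(module_path: str, subpackages: set[str]) -> str:
--     """
--     Pick the most likely "main" subpackage from candidates.
--
--     Heuristics (in priority order):
--     1. Subpackage whose name is a prefix of the module name or vice versa
--        (e.g., "proto" for module "protobuf")
--     2. Shortest name among remaining candidates
--     3. Alphabetically first as tiebreaker
--     """
--     module_name = module_path.rstrip("/").split("/")[-1].lower()
--     candidates = sorted(subpackages)
--
--     # Look for prefix relationship with module name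
--     for sub in candidates:
--         sub_lower = sub.lower()
--         if module_name.startswith(sub_lower) or sub_lower.startswith(module_name):
--             return sub
--
--     # Fall back to shortest name (likely the most "core" package)
--     return min(candidates, key=lambda s: (len(s), s))
-- ===== SOURCE B (Python) =====
-- def _pick_best_subpackage(module_path: str, subpackages: set[str]) -> str:
--     """One pass, no sort: track the alphabetically-smallest prefix-related
--     candidate; fall back to the (len, name) minimum."""
--     module_name = module_path.rstrip("/").split("/")[-1].lower()
--     best_prefix = None
--     for sub in subpackages:
--         low = sub.lower()
--         if module_name.startswith(low) or low.startswith(module_name):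
--             if best_prefix is None or sub < best_prefix:
--                 best_prefix = sub
--     if best_prefix is not None:
--         return best_prefix
--     return min(subpackages, key=lambda s: (len(s), s))
-- ===== Notes on version B (the rewrite author's own statement) =====
-- stated objective: alternative
-- what changed: Replaces sort-then-scan (sorted(subpackages), first prefix match, min over the sorted list) by a single unsorted pass keeping the alphabetically-smallest prefix-related candidate, with the unsorted min(key=(len,s)) as fallback.
import Mathlib
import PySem

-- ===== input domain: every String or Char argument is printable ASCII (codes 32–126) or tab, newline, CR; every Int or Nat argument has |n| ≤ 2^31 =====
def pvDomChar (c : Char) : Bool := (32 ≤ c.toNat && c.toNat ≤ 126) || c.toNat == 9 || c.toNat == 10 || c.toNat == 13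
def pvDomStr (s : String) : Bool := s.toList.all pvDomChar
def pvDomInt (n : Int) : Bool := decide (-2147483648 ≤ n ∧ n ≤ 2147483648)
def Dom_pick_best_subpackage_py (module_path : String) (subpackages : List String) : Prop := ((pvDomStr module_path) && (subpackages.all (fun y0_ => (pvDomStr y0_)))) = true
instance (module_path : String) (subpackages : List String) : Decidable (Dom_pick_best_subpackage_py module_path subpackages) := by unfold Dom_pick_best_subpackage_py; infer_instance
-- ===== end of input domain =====

-- B replaces A's sort-then-scan by a single unsorted pass (alphabetically-smallest
-- prefix-related candidate, with the (len, name) minimum as fallback): alternative decomposition.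


-- shared helpers: both Pythons contain the identical line
--   module_name = module_path.rstrip("/").split("/")[-1].lower()
-- str.rstrip("/") ported by hand (PySem has no rstrip-with-chars): drop trailing '/' characters; exact
def pvRstripSlash (s : String) : String :=
  String.ofList ((s.toList.reverse.dropWhile (fun c => c == '/')).reverse)

def pvModuleName (module_path : String) : String :=
  PySem.Str.lower (((PySem.Str.split? (pvRstripSlash module_path) "/").getD []).getLastD "")

-- the prefix test both Pythons perform on a candidate
def pvIsPrefixRel (module_name sub : String) : Bool :=
  let sub_lower := PySem.Str.lower sub
  PySem.Str.startswith module_name sub_lower || PySem.Str.startswith sub_lower module_name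

-- ===== PORT A =====
-- A's for-loop over the sorted candidates, returning at the first prefix match
def pvFindFirst (mn : String) : List String → Option String
  | [] => none
  | sub :: rest => if pvIsPrefixRel mn sub then some sub else pvFindFirst mn rest

def pick_best_subpackage_py (module_path : String) (subpackages : List String) : String :=
  let module_name := pvModuleName module_path
  let candidates := PySem.List.sorted subpackages (fun s => s) false
  match pvFindFirst module_name candidates with
  | some sub => sub
  | none =>
    match PySem.List.min2? candidates (fun s => PySem.Str.len s) (fun s => s) with
    | some m => m
    | none => ""  -- unreachable under Pre_ (Python raises ValueError on empty input)

-- ===== PORT B =====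
-- B's single pass: keep the alphabetically-smallest prefix-related candidate
def pvBestStep (mn : String) (acc : Option String) (sub : String) : Option String :=
  if pvIsPrefixRel mn sub then
    match acc with
    | none => some sub
    | some b => if sub < b then some sub else some b
  else acc

def pick_best_subpackage_py_alt (module_path : String) (subpackages : List String) : String :=
  let module_name := pvModuleName module_path
  match subpackages.foldl (pvBestStep module_name) none with
  | some b => b
  | none =>
    match PySem.List.min2? subpackages (fun s => PySem.Str.len s) (fun s => s) with
    | some m => m
    | none => ""  -- unreachable under Pre_ (Python raises ValueError on empty input)

-- ===== PRECONDITION & SPEC =====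
-- Pre_ excludes only the empty candidate set, on which the Python A raises ValueError (min of an empty sequence).
def Pre_pick_best_subpackage_py (module_path : String) (subpackages : List String) : Prop :=
  subpackages ≠ []
instance (module_path : String) (subpackages : List String) : Decidable (Pre_pick_best_subpackage_py module_path subpackages) := by unfold Pre_pick_best_subpackage_py; infer_instance

def pvWitness_pick_best_subpackage_py : String × List String := ("libs/protobuf", ["proto", "abc"])

def Spec_pick_best_subpackage_py (module_path : String) (subpackages : List String) (out : String) : Prop := out = pick_best_subpackage_py_alt module_path subpackages
instance (module_path : String) (subpackages : List String) (out : String) : Decidable (Spec_pick_best_subpackage_py module_path subpackages out) := by unfold Spec_pick_best_subpackage_py; infer_instance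

-- ===== CLAIM (what is proved, stated in full; the proofs are below) =====
def Claim_equal_pick_best_subpackage_py : Prop := ∀ (module_path : String) (subpackages : List String), Dom_pick_best_subpackage_py module_path subpackages → Pre_pick_best_subpackage_py module_path subpackages → Spec_pick_best_subpackage_py module_path subpackages (pick_best_subpackage_py module_path subpackages)

-- ===== LEMMAS AND PROOFS =====

-- A's scan over a list is head-of-filter
theorem pvFindFirst_eq_head_filter (mn : String) (l : List String) :
    pvFindFirst mn l = (l.filter (pvIsPrefixRel mn)).head? := by
  induction l with
  | nil => rfl
  | cons x t ih =>
    by_cases h : pvIsPrefixRel mn x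
    · rw [List.filter_cons_of_pos h]; simp [pvFindFirst, h]
    · rw [List.filter_cons_of_neg (by simp [h])]
      simp [pvFindFirst, h, ih]

-- B's fold computes a minimal element of the filtered list (seeded accumulator form)
theorem pvBestStep_fold_some (mn : String) (t : List String) :
    ∀ m, ∃ b, t.foldl (pvBestStep mn) (some m) = some b ∧
      b ∈ m :: t.filter (pvIsPrefixRel mn) ∧
      ∀ y ∈ m :: t.filter (pvIsPrefixRel mn), b ≤ y := by
  induction t with
  | nil =>
    intro m
    exact ⟨m, rfl, List.mem_cons_self .., by intro y hy; simp at hy; simp [hy]⟩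
  | cons x r ih =>
    intro m
    by_cases hx : pvIsPrefixRel mn x
    · rw [List.filter_cons_of_pos hx]
      by_cases hlt : x < m
      · obtain ⟨b, hb, hmem, hmin⟩ := ih x
        refine ⟨b, ?_, ?_, ?_⟩
        · rw [List.foldl_cons]; simpa [pvBestStep, hx, hlt] using hb
        · rcases List.mem_cons.mp hmem with h1 | h1
          · exact List.mem_cons.mpr (Or.inr (List.mem_cons.mpr (Or.inl h1)))
          · exact List.mem_cons.mpr (Or.inr (List.mem_cons.mpr (Or.inr h1)))
        · intro y hy
          rcases List.mem_cons.mp hy with h1 | h1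
          · exact h1 ▸ le_trans (hmin x (List.mem_cons_self ..)) (le_of_lt hlt)
          · exact hmin y h1
      · obtain ⟨b, hb, hmem, hmin⟩ := ih m
        refine ⟨b, ?_, ?_, ?_⟩
        · rw [List.foldl_cons]; simpa [pvBestStep, hx, hlt] using hb
        · rcases List.mem_cons.mp hmem with h1 | h1
          · exact List.mem_cons.mpr (Or.inl h1)
          · exact List.mem_cons.mpr (Or.inr (List.mem_cons.mpr (Or.inr h1)))
        · intro y hy
          rcases List.mem_cons.mp hy with h1 | h1
          · exact h1 ▸ hmin m (List.mem_cons_self ..)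
          · rcases List.mem_cons.mp h1 with h2 | h2
            · exact h2 ▸ le_trans (hmin m (List.mem_cons_self ..)) (not_lt.mp hlt)
            · exact hmin y (List.mem_cons.mpr (Or.inr h2))
    · rw [List.filter_cons_of_neg (by simp [hx])]
      obtain ⟨b, hb, hmem, hmin⟩ := ih m
      exact ⟨b, by rw [List.foldl_cons]; simpa [pvBestStep, hx] using hb, hmem, hmin⟩

theorem pvBestStep_fold_none (mn : String) (l : List String) :
    l.filter (pvIsPrefixRel mn) = [] → l.foldl (pvBestStep mn) none = none := by
  induction l with
  | nil => intro _; rfl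
  | cons x t ih =>
    intro h
    by_cases hx : pvIsPrefixRel mn x
    · rw [List.filter_cons_of_pos hx] at h; cases h
    · rw [List.filter_cons_of_neg (by simp [hx])] at h
      rw [List.foldl_cons]
      have : pvBestStep mn none x = none := by simp [pvBestStep, hx]
      rw [this]; exact ih h

theorem pvBestStep_fold_pos (mn : String) (l : List String)
    (h : l.filter (pvIsPrefixRel mn) ≠ []) :
    ∃ b, l.foldl (pvBestStep mn) none = some b ∧
      b ∈ l.filter (pvIsPrefixRel mn) ∧ ∀ y ∈ l.filter (pvIsPrefixRel mn), b ≤ y := by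
  induction l with
  | nil => exact absurd rfl h
  | cons z t ih =>
    by_cases hz : pvIsPrefixRel mn z
    · obtain ⟨b, hb, hm, hmin⟩ := pvBestStep_fold_some mn t z
      rw [List.filter_cons_of_pos hz]
      refine ⟨b, ?_, hm, hmin⟩
      rw [List.foldl_cons]
      have : pvBestStep mn none z = some z := by simp [pvBestStep, hz]
      rw [this]; exact hb
    · rw [List.filter_cons_of_neg (by simp [hz])] at h ⊢
      obtain ⟨b, hb, hm, hmin⟩ := ih h
      refine ⟨b, ?_, hm, hmin⟩
      rw [List.foldl_cons]
      have : pvBestStep mn none z = none := by simp [pvBestStep, hz]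
      rw [this]; exact hb

-- min2? with keys (len, id): characterization as a lexicographic minimum
def pvLexLe (a y : String) : Prop :=
  a.length < y.length ∨ (a.length = y.length ∧ a ≤ y)

theorem pvLexLe_trans {a b c : String} (h1 : pvLexLe a b) (h2 : pvLexLe b c) : pvLexLe a c := by
  rcases h1 with h1 | ⟨h1, h1'⟩ <;> rcases h2 with h2 | ⟨h2, h2'⟩
  · exact Or.inl (lt_trans h1 h2)
  · exact Or.inl (h2 ▸ h1)
  · exact Or.inl (h1 ▸ h2)
  · exact Or.inr ⟨h1.trans h2, le_trans h1' h2'⟩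

theorem pvLexLe_antisymm {a b : String} (h1 : pvLexLe a b) (h2 : pvLexLe b a) : a = b := by
  rcases h1 with h1 | ⟨h1, h1'⟩ <;> rcases h2 with h2 | ⟨h2, h2'⟩
  · omega
  · omega
  · omega
  · exact le_antisymm h1' h2'

theorem pvLen_lt_iff {a b : String} : PySem.Str.len a < PySem.Str.len b ↔ a.length < b.length := by
  simp [PySem.Str.len]

theorem pvStep2_cond_true {x m : String}
    (h : (decide (PySem.Str.len x < PySem.Str.len m) ||
        !decide (PySem.Str.len m < PySem.Str.len x) && decide (x < m)) = true) : pvLexLe x m := by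
  by_cases h1 : PySem.Str.len x < PySem.Str.len m
  · exact Or.inl (pvLen_lt_iff.mp h1)
  · rw [decide_eq_false h1] at h
    simp only [Bool.false_or, Bool.and_eq_true, Bool.not_eq_true', decide_eq_false_iff_not,
      decide_eq_true_eq] at h
    obtain ⟨h2, h3⟩ := h
    have e1 : ¬ x.length < m.length := fun hc => h1 (pvLen_lt_iff.mpr hc)
    have e2 : ¬ m.length < x.length := fun hc => h2 (pvLen_lt_iff.mpr hc)
    exact Or.inr ⟨by omega, le_of_lt h3⟩

theorem pvStep2_cond_false {x m : String}
    (h : ¬ (decide (PySem.Str.len x < PySem.Str.len m) ||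
        !decide (PySem.Str.len m < PySem.Str.len x) && decide (x < m)) = true) : pvLexLe m x := by
  simp only [Bool.or_eq_true, Bool.and_eq_true, Bool.not_eq_true', decide_eq_false_iff_not,
    decide_eq_true_eq, not_or, not_and] at h
  obtain ⟨h1, h2⟩ := h
  by_cases h3 : PySem.Str.len m < PySem.Str.len x
  · exact Or.inl (pvLen_lt_iff.mp h3)
  · have e1 : ¬ x.length < m.length := fun hc => h1 (pvLen_lt_iff.mpr hc)
    have e2 : ¬ m.length < x.length := fun hc => h3 (pvLen_lt_iff.mpr hc)
    exact Or.inr ⟨by omega, not_lt.mp (h2 h3)⟩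

-- any fold step that always keeps the lexicographically-smaller of accumulator and element
-- computes a lexicographic minimum
theorem pvFoldMin_some (f : Option String → String → Option String)
    (hf : ∀ m x, (f (some m) x = some x ∧ pvLexLe x m) ∨ (f (some m) x = some m ∧ pvLexLe m x)) :
    ∀ (t : List String) (m : String), ∃ b, t.foldl f (some m) = some b ∧ b ∈ m :: t ∧
      ∀ y ∈ m :: t, pvLexLe b y := by
  intro t
  induction t with
  | nil =>
    intro m
    refine ⟨m, rfl, List.mem_cons_self .., ?_⟩
    intro y hy; simp at hy; subst hy; exact Or.inr ⟨rfl, le_refl _⟩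
  | cons x r ih =>
    intro m
    rcases hf m x with ⟨he, hle⟩ | ⟨he, hle⟩
    · obtain ⟨b, hb, hm, hmin⟩ := ih x
      refine ⟨b, ?_, ?_, ?_⟩
      · rw [List.foldl_cons, he]; exact hb
      · rcases List.mem_cons.mp hm with h1 | h1
        · exact List.mem_cons.mpr (Or.inr (List.mem_cons.mpr (Or.inl h1)))
        · exact List.mem_cons.mpr (Or.inr (List.mem_cons.mpr (Or.inr h1)))
      · intro y hy
        rcases List.mem_cons.mp hy with h1 | h1
        · exact h1 ▸ pvLexLe_trans (hmin x (List.mem_cons_self ..)) hle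
        · exact hmin y h1
    · obtain ⟨b, hb, hm, hmin⟩ := ih m
      refine ⟨b, ?_, ?_, ?_⟩
      · rw [List.foldl_cons, he]; exact hb
      · rcases List.mem_cons.mp hm with h1 | h1
        · exact List.mem_cons.mpr (Or.inl h1)
        · exact List.mem_cons.mpr (Or.inr (List.mem_cons.mpr (Or.inr h1)))
      · intro y hy
        rcases List.mem_cons.mp hy with h1 | h1
        · exact h1 ▸ hmin m (List.mem_cons_self ..)
        · rcases List.mem_cons.mp h1 with h2 | h2
          · exact h2 ▸ pvLexLe_trans (hmin m (List.mem_cons_self ..)) hle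
          · exact hmin y (List.mem_cons.mpr (Or.inr h2))

def pvStep2 (acc : Option String) (z : String) : Option String :=
  match acc with
  | none => some z
  | some m =>
    if (decide (PySem.Str.len z < PySem.Str.len m) ||
        !decide (PySem.Str.len m < PySem.Str.len z) && decide (z < m)) = true
    then some z else some m

theorem pvMin2_eq_foldl (l : List String) :
    PySem.List.min2? l (fun s => PySem.Str.len s) (fun s => s) = l.foldl pvStep2 none := by
  unfold PySem.List.min2?
  apply List.foldl_ext
  intro acc z _
  cases acc with
  | none => rfl
  | some m => rfl

theorem pvMin2_spec (l : List String) (h : l ≠ []) :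
    ∃ m, PySem.List.min2? l (fun s => PySem.Str.len s) (fun s => s) = some m ∧
      m ∈ l ∧ ∀ y ∈ l, pvLexLe m y := by
  cases l with
  | nil => exact absurd rfl h
  | cons x t =>
    have hf : ∀ (m y : String),
        (pvStep2 (some m) y = some y ∧ pvLexLe y m) ∨ (pvStep2 (some m) y = some m ∧ pvLexLe m y) := by
      intro m y
      by_cases hc : (decide (PySem.Str.len y < PySem.Str.len m) ||
          !decide (PySem.Str.len m < PySem.Str.len y) && decide (y < m)) = true
      · exact Or.inl ⟨by simp only [pvStep2]; rw [if_pos hc], pvStep2_cond_true hc⟩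
      · exact Or.inr ⟨by simp only [pvStep2]; rw [if_neg hc], pvStep2_cond_false hc⟩
    obtain ⟨b, hb, hm, hmin⟩ := pvFoldMin_some pvStep2 hf t x
    refine ⟨b, ?_, hm, hmin⟩
    rw [pvMin2_eq_foldl, List.foldl_cons]
    have h0 : pvStep2 none x = some x := rfl
    rw [h0]; exact hb

theorem pvMin2_perm_eq (l l' : List String) (hp : l.Perm l') (h : l ≠ []) :
    PySem.List.min2? l (fun s => PySem.Str.len s) (fun s => s) =
    PySem.List.min2? l' (fun s => PySem.Str.len s) (fun s => s) := by
  have h' : l' ≠ [] := by intro hn; exact h (List.Perm.eq_nil (hn ▸ hp))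
  obtain ⟨m, hm, hmem, hmin⟩ := pvMin2_spec l h
  obtain ⟨m', hm', hmem', hmin'⟩ := pvMin2_spec l' h'
  have e : m = m' :=
    pvLexLe_antisymm (hmin m' (hp.symm.mem_iff.mp hmem')) (hmin' m (hp.mem_iff.mp hmem))
  rw [hm, hm', e]

-- head of the filtered sorted list is minimal among filtered elements
theorem pvHead_filter_sorted_min (mn : String) (l : List String) {h : String} {t : List String}
    (he : (PySem.List.sorted l (fun s => s) false).filter (pvIsPrefixRel mn) = h :: t) :
    ∀ y ∈ h :: t, h ≤ y := by
  have hpw : ((PySem.List.sorted l (fun s => s) false).filter (pvIsPrefixRel mn)).Pairwise (· ≤ ·) :=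
    List.Pairwise.filter _ (PySem.List.sorted_pairwise l (fun s => s))
  rw [he] at hpw
  intro y hy
  rcases List.mem_cons.mp hy with h1 | h1
  · exact h1 ▸ le_refl _
  · exact (List.pairwise_cons.mp hpw).1 y h1

-- ===== VERDICT (by name: the statement is the Claim_ definition above) =====
theorem pick_best_subpackage_py_spec : Claim_equal_pick_best_subpackage_py := by
  intro module_path subpackages _ hpre
  unfold Spec_pick_best_subpackage_py
  simp only [pick_best_subpackage_py, pick_best_subpackage_py_alt]
  set mn := pvModuleName module_path with hmn
  set cand := PySem.List.sorted subpackages (fun s => s) false with hcand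
  have hperm : cand.Perm subpackages := PySem.List.sorted_perm subpackages (fun s => s) false
  have hpermf : (cand.filter (pvIsPrefixRel mn)).Perm (subpackages.filter (pvIsPrefixRel mn)) :=
    hperm.filter _
  rw [pvFindFirst_eq_head_filter]
  by_cases hnil : subpackages.filter (pvIsPrefixRel mn) = []
  · have hnil' : cand.filter (pvIsPrefixRel mn) = [] := List.Perm.eq_nil (hnil ▸ hpermf)
    rw [hnil', pvBestStep_fold_none mn subpackages hnil]
    have hc : cand ≠ [] := by
      intro hn; exact hpre ((hn ▸ hperm).symm.eq_nil)
    simp only [List.head?_nil]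
    rw [pvMin2_perm_eq cand subpackages hperm hc]
  · have hnilc : cand.filter (pvIsPrefixRel mn) ≠ [] := by
      intro hn; exact hnil ((hn ▸ hpermf).symm.eq_nil)
    obtain ⟨h, t, he⟩ := List.exists_cons_of_ne_nil hnilc
    obtain ⟨b, hb, hmemb, hminb⟩ := pvBestStep_fold_pos mn subpackages hnil
    have hmins := pvHead_filter_sorted_min mn subpackages (hcand ▸ he)
    have hhb : h = b := by
      apply le_antisymm
      · exact hmins b (by rw [← he]; exact hpermf.symm.mem_iff.mp hmemb)
      · exact hminb h (hpermf.mem_iff.mp (by rw [he]; exact List.mem_cons_self ..))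
    rw [he, hb]
    simp [hhb]
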